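-- pv_equiv track=rewrite | github.com/ghost331188/x-scan | geoip_db/tool.py | classify_links
-- ===== SOURCE A (Python) =====
-- def classify_links(links):
--     """按协议类型分类链接"""
--     vmess_links = []
--     vless_links = []
--     trojan_links = []
--     ss_links = []
--     http_links = []
--     socks_links = []
--
--     for link in links:
--         if link.startswith("vmess://"):
--             vmess_links.append(link)
--         elif link.startswith("vless://"):
--             vless_links.append(link)
--         elif link.startswith("trojan://"):
--             trojan_links.append(link)
--         elif link.startswith("ss://"):
--             ss_links.append(link)
--         elif link.startswith("http://"):
--             http_links.append(link)
--         elif link.startswith("socks://"):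
--             socks_links.append(link)
--
--     return vmess_links, vless_links, trojan_links, ss_links, http_links, socks_links
-- ===== SOURCE B (Python) =====
-- def classify_links(links):
--     """按协议类型分类链接"""
--     def bucket(prefix):
--         return [link for link in links if link.startswith(prefix)]
--
--     return (bucket("vmess://"), bucket("vless://"), bucket("trojan://"),
--             bucket("ss://"), bucket("http://"), bucket("socks://"))
-- ===== Notes on version B (the rewrite author's own statement) =====
-- stated objective: idiomatic
-- what changed: Replaces the single loop with a six-way if/elif cascade and six mutable accumulators by one independent filter (comprehension) per protocol prefix, relying on the six prefixes being mutually exclusive.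
import Mathlib
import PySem

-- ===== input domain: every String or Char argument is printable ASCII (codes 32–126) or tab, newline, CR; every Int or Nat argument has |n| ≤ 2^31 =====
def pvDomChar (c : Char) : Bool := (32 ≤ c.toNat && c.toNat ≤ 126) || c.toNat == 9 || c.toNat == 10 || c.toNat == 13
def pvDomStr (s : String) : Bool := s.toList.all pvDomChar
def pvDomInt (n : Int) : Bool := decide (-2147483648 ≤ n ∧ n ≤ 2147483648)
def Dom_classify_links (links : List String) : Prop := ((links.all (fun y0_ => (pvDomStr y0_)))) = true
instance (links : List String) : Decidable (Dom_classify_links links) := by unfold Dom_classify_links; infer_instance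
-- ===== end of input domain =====

-- B replaces A's single loop with a six-way if/elif cascade by one independent filter per
-- protocol prefix (valid because the six prefixes are mutually exclusive); objective: idiomatic.


-- ===== PORT A =====
-- step of A's for-loop: the if/elif cascade over the six accumulators
def pvStepA (acc : List String × List String × List String × List String × List String × List String)
    (link : String) : List String × List String × List String × List String × List String × List String :=
  match acc with
  | (vmess, vless, trojan, ss, http, socks) =>
    if PySem.Str.startswith link "vmess://" then (vmess ++ [link], vless, trojan, ss, http, socks)
    else if PySem.Str.startswith link "vless://" then (vmess, vless ++ [link], trojan, ss, http, socks)
    else if PySem.Str.startswith link "trojan://" then (vmess, vless, trojan ++ [link], ss, http, socks)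
    else if PySem.Str.startswith link "ss://" then (vmess, vless, trojan, ss ++ [link], http, socks)
    else if PySem.Str.startswith link "http://" then (vmess, vless, trojan, ss, http ++ [link], socks)
    else if PySem.Str.startswith link "socks://" then (vmess, vless, trojan, ss, http, socks ++ [link])
    else (vmess, vless, trojan, ss, http, socks)

def classify_links (links : List String) : List String × List String × List String × List String × List String × List String :=
  links.foldl pvStepA ([], [], [], [], [], [])

-- ===== PORT B =====
-- B: one independent filter per protocol prefix
def pvBucket (links : List String) (pfx : String) : List String :=
  links.filter (fun link => PySem.Str.startswith link pfx)

def classify_links_alt (links : List String) : List String × List String × List String × List String × List String × List String :=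
  (pvBucket links "vmess://", pvBucket links "vless://", pvBucket links "trojan://",
   pvBucket links "ss://", pvBucket links "http://", pvBucket links "socks://")

-- ===== PRECONDITION & SPEC =====
def Spec_classify_links (links : List String) (out : List String × List String × List String × List String × List String × List String) : Prop := out = classify_links_alt links
instance (links : List String) (out : List String × List String × List String × List String × List String × List String) : Decidable (Spec_classify_links links out) := by unfold Spec_classify_links; infer_instance

-- ===== CLAIM (what is proved, stated in full; the proofs are below) =====
def Claim_equal_classify_links : Prop := ∀ (links : List String), Dom_classify_links links → Spec_classify_links links (classify_links links)

-- ===== LEMMAS AND PROOFS =====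

-- two string prefixes neither of which is a prefix of the other cannot both start the same string
theorem pv_excl {s p q : String} (h : PySem.Str.startswith s p = true)
    (hpq : ¬ (p.toList <+: q.toList)) (hqp : ¬ (q.toList <+: p.toList)) :
    PySem.Str.startswith s q = false := by
  by_contra hcon
  have hq : PySem.Str.startswith s q = true := by
    cases hq : PySem.Str.startswith s q with
    | true => rfl
    | false => exact absurd hq hcon
  have hp' : p.toList <+: s.toList := by
    have := h; rw [PySem.Str.startswith_eq] at this; exact (PySem.Chars.startswith_iff _ _).mp this
  have hq' : q.toList <+: s.toList := by
    rw [PySem.Str.startswith_eq] at hq; exact (PySem.Chars.startswith_iff _ _).mp hq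
  rcases List.prefix_or_prefix_of_prefix hp' hq' with h1 | h1
  · exact hpq h1
  · exact hqp h1

theorem pv_fold (links : List String) (v vl t s h k : List String) :
    links.foldl pvStepA (v, vl, t, s, h, k) =
      (v ++ pvBucket links "vmess://", vl ++ pvBucket links "vless://",
       t ++ pvBucket links "trojan://", s ++ pvBucket links "ss://",
       h ++ pvBucket links "http://", k ++ pvBucket links "socks://") := by
  induction links generalizing v vl t s h k with
  | nil => simp [pvBucket]
  | cons x xs ih =>
    simp only [List.foldl_cons, pvStepA]
    by_cases h1 : PySem.Str.startswith x "vmess://" = true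
    · have e2 := pv_excl h1 (q := "vless://") (by decide) (by decide)
      have e3 := pv_excl h1 (q := "trojan://") (by decide) (by decide)
      have e4 := pv_excl h1 (q := "ss://") (by decide) (by decide)
      have e5 := pv_excl h1 (q := "http://") (by decide) (by decide)
      have e6 := pv_excl h1 (q := "socks://") (by decide) (by decide)
      simp only [h1, e2, e3, e4, e5, e6]; (simp [pvBucket, ih]; simp_all [List.filter_cons])
    · by_cases h2 : PySem.Str.startswith x "vless://" = true
      · have e3 := pv_excl h2 (q := "trojan://") (by decide) (by decide)
        have e4 := pv_excl h2 (q := "ss://") (by decide) (by decide)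
        have e5 := pv_excl h2 (q := "http://") (by decide) (by decide)
        have e6 := pv_excl h2 (q := "socks://") (by decide) (by decide)
        simp only [h1, h2, e3, e4, e5, e6]; (simp [pvBucket, ih]; simp_all [List.filter_cons])
      · by_cases h3 : PySem.Str.startswith x "trojan://" = true
        · have e4 := pv_excl h3 (q := "ss://") (by decide) (by decide)
          have e5 := pv_excl h3 (q := "http://") (by decide) (by decide)
          have e6 := pv_excl h3 (q := "socks://") (by decide) (by decide)
          simp only [h1, h2, h3, e4, e5, e6]; (simp [pvBucket, ih]; simp_all [List.filter_cons])
        · by_cases h4 : PySem.Str.startswith x "ss://" = true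
          · have e5 := pv_excl h4 (q := "http://") (by decide) (by decide)
            have e6 := pv_excl h4 (q := "socks://") (by decide) (by decide)
            simp only [h1, h2, h3, h4, e5, e6]; (simp [pvBucket, ih]; simp_all [List.filter_cons])
          · by_cases h5 : PySem.Str.startswith x "http://" = true
            · have e6 := pv_excl h5 (q := "socks://") (by decide) (by decide)
              simp only [h1, h2, h3, h4, h5, e6]; (simp [pvBucket, ih]; simp_all [List.filter_cons])
            · by_cases h6 : PySem.Str.startswith x "socks://" = true
              · simp only [h1, h2, h3, h4, h5, h6]; (simp [pvBucket, ih]; simp_all [List.filter_cons])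
              · simp only [h1, h2, h3, h4, h5, h6]; (simp [pvBucket, ih]; simp_all [List.filter_cons])

-- ===== VERDICT (by name: the statement is the Claim_ definition above) =====
theorem classify_links_spec : Claim_equal_classify_links := by
  intro links _
  show classify_links links = classify_links_alt links
  simp [classify_links, classify_links_alt, pv_fold]
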